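-- pv_equiv track=rewrite | github.com/albertogerli/Agentic_Paper | main.py | _identify_sections_heuristic
-- ===== SOURCE A (Python) =====
-- from typing import List, Dict, Any, Optional, Tuple, Callable
--
-- def _identify_sections_heuristic(paper_text: str, standard_sections: List[str]) -> List[str]:
--     """Heuristic approach to identify sections when pattern matching fails."""
--     sections_found = []
--     text_lower = paper_text.lower()
--
--     # Look for the standard sections in the text
--     for section in standard_sections:
--         section_lower = section.lower()
--
--         # Look for variants of the section
--         patterns = [
--             f"\n{section_lower}\n",
--             f"\n{section_lower}:",
--             f"\n{section_lower}.",
--             f"\n1. {section_lower}",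
--             f"\n2. {section_lower}",
--             f"\n3. {section_lower}",
--             f"\n4. {section_lower}",
--             f"\n5. {section_lower}",
--         ]
--
--         for pattern in patterns:
--             if pattern in text_lower:
--                 sections_found.append(section)
--                 break
--
--     return sections_found
-- ===== SOURCE B (Python) =====
-- from typing import List
--
--
-- def _is_header_at(text: str, pos: int, section_lower: str) -> bool:
--     """Does text, at offset pos (just after a newline), start like a header for this section?"""
--     if (text.startswith(section_lower + "\n", pos)
--             or text.startswith(section_lower + ":", pos)
--             or text.startswith(section_lower + ".", pos)):
--         return True
--     return any(text.startswith(f"{k}. {section_lower}", pos) for k in range(1, 6))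
--
--
-- def _identify_sections_heuristic(paper_text: str, standard_sections: List[str]) -> List[str]:
--     """Single scan over newline positions; mark matching sections, then filter."""
--     text_lower = paper_text.lower()
--     lowers = [s.lower() for s in standard_sections]
--     matched = set()
--     for i, ch in enumerate(text_lower):
--         if ch == '\n':
--             for j, sl in enumerate(lowers):
--                 if j not in matched and _is_header_at(text_lower, i + 1, sl):
--                     matched.add(j)
--     return [s for j, s in enumerate(standard_sections) if j in matched]
-- ===== Notes on version B (the rewrite author's own statement) =====
-- stated objective: faster
-- what changed: Replaces A's per-section loop of 8 whole-text substring scans by one pass over the text's newline positions that prefix-tests each not-yet-matched section there, collects matched section indices in a set, and finally filters standard_sections in order.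
import Mathlib
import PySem

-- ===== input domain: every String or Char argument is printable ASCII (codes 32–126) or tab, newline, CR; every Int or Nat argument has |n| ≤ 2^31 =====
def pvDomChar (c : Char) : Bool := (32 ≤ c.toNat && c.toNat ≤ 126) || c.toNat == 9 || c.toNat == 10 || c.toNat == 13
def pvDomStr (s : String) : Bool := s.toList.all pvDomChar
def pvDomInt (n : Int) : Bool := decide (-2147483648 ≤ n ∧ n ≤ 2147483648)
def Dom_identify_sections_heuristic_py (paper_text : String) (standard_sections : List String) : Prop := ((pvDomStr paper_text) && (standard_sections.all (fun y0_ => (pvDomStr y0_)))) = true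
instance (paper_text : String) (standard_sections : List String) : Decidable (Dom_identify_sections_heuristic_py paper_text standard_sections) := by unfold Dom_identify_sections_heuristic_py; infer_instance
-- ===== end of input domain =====

-- B replaces A's per-section whole-text substring scans by one pass over the newline
-- positions that prefix-tests each not-yet-matched section there; same return value.

-- ===== PORT A =====
-- strings are ported as List Char (PySem.Chars is the ground truth for Python str ops);
-- 'for pattern in patterns: if pattern in text_lower: append; break' = append once if any pattern occurs
def identify_sections_heuristic_py (paper_text : String) (standard_sections : List String) : List String :=
  let text_lower := PySem.Chars.lower paper_text.toList
  standard_sections.foldl (fun sections_found section_ =>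
    if [ '\n' :: (PySem.Chars.lower section_.toList ++ ['\n'])
       , '\n' :: (PySem.Chars.lower section_.toList ++ [':'])
       , '\n' :: (PySem.Chars.lower section_.toList ++ ['.'])
       , '\n' :: ('1' :: '.' :: ' ' :: PySem.Chars.lower section_.toList)
       , '\n' :: ('2' :: '.' :: ' ' :: PySem.Chars.lower section_.toList)
       , '\n' :: ('3' :: '.' :: ' ' :: PySem.Chars.lower section_.toList)
       , '\n' :: ('4' :: '.' :: ' ' :: PySem.Chars.lower section_.toList)
       , '\n' :: ('5' :: '.' :: ' ' :: PySem.Chars.lower section_.toList)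
       ].any (fun pattern => PySem.Chars.isIn pattern text_lower) then
      sections_found ++ [section_]
    else sections_found) []

-- ===== PORT B =====
-- text.startswith(p, pos) with 0 ≤ pos ≤ len(text) is exactly startswith on the suffix text[pos:]
def pvIsHeaderAt (text : List Char) (pos : Nat) (section_lower : List Char) : Bool :=
  if PySem.Chars.startswith (text.drop pos) (section_lower ++ ['\n'])
      || PySem.Chars.startswith (text.drop pos) (section_lower ++ [':'])
      || PySem.Chars.startswith (text.drop pos) (section_lower ++ ['.']) then
    true
  else
    (PySem.List.pyRange 1 6 1).any (fun k =>
      PySem.Chars.startswith (text.drop pos) (PySem.Int.toChars k ++ ('.' :: ' ' :: section_lower)))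

def identify_sections_heuristic_py_alt (paper_text : String) (standard_sections : List String) : List String :=
  let text_lower := PySem.Chars.lower paper_text.toList
  let lowers := standard_sections.map (fun s => PySem.Chars.lower s.toList)
  -- enumerate indices are ≥ 0, so '.toNat' on them is exact
  let matched : PySem.Set Int :=
    (PySem.List.enumerate text_lower).foldl (fun matched p =>
      if p.2 = '\n' then
        (PySem.List.enumerate lowers).foldl (fun matched q =>
          if !(PySem.Set.contains matched q.1) && pvIsHeaderAt text_lower (p.1.toNat + 1) q.2 then
            PySem.Set.add matched q.1
          else matched) matched
      else matched) PySem.Set.empty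
  (PySem.List.enumerate standard_sections).foldl (fun out q =>
    if PySem.Set.contains matched q.1 then out ++ [q.2] else out) []

-- ===== PRECONDITION & SPEC =====
def Spec_identify_sections_heuristic_py (paper_text : String) (standard_sections : List String) (out : List String) : Prop := out = identify_sections_heuristic_py_alt paper_text standard_sections
instance (paper_text : String) (standard_sections : List String) (out : List String) : Decidable (Spec_identify_sections_heuristic_py paper_text standard_sections out) := by unfold Spec_identify_sections_heuristic_py; infer_instance

-- ===== CLAIM (what is proved, stated in full; the proofs are below) =====
def Claim_equal_identify_sections_heuristic_py : Prop := ∀ (paper_text : String) (standard_sections : List String), Dom_identify_sections_heuristic_py paper_text standard_sections → Spec_identify_sections_heuristic_py paper_text standard_sections (identify_sections_heuristic_py paper_text standard_sections)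

-- ===== LEMMAS AND PROOFS =====

-- a '\n'-led pattern is a prefix of (drop k t) iff t holds '\n' at k and the tail pattern follows
theorem pv_cons_prefix_drop (t X : List Char) (k : Nat) :
    ('\n' :: X <+: t.drop k) ↔ (t[k]? = some '\n' ∧ X <+: t.drop (k + 1)) := by
  by_cases h : k < t.length
  · rw [List.drop_eq_getElem_cons h, List.cons_prefix_cons, List.getElem?_eq_getElem h]
    constructor
    · rintro ⟨h1, h2⟩; exact ⟨by rw [h1], h2⟩
    · rintro ⟨h1, h2⟩
      refine ⟨?_, h2⟩
      injection h1 with h1; exact h1.symm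
  · rw [List.drop_eq_nil_of_le (by omega), List.getElem?_eq_none (by omega)]
    simp

-- a '\n'-led pattern occurs in t iff some position k holds '\n' and the tail pattern follows
theorem pv_isIn_cons_newline (t X : List Char) :
    PySem.Chars.isIn ('\n' :: X) t = true ↔
      ∃ k : Nat, t[k]? = some '\n' ∧ X <+: t.drop (k + 1) := by
  rw [← PySem.Chars.exists_prefix_drop_iff_isIn]
  exact exists_congr (fun k => pv_cons_prefix_drop t X k)

-- pvIsHeaderAt unfolded to the disjunction of A's tail-patterns
theorem pv_isHeaderAt_iff (t : List Char) (pos : Nat) (sl : List Char) :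
    pvIsHeaderAt t pos sl = true ↔
      ((sl ++ ['\n']) <+: t.drop pos ∨ (sl ++ [':']) <+: t.drop pos ∨ (sl ++ ['.']) <+: t.drop pos ∨
       ('1' :: '.' :: ' ' :: sl) <+: t.drop pos ∨ ('2' :: '.' :: ' ' :: sl) <+: t.drop pos ∨
       ('3' :: '.' :: ' ' :: sl) <+: t.drop pos ∨ ('4' :: '.' :: ' ' :: sl) <+: t.drop pos ∨
       ('5' :: '.' :: ' ' :: sl) <+: t.drop pos) := by
  unfold pvIsHeaderAt
  have hr : PySem.List.pyRange 1 6 1 = [1, 2, 3, 4, 5] := by decide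
  rw [hr]
  simp only [List.any_cons, List.any_nil]
  split_ifs with h
  · simp only [Bool.or_eq_true, PySem.Chars.startswith_iff] at h ⊢
    tauto
  · simp only [Bool.or_eq_true, PySem.Chars.startswith_iff] at h ⊢
    simp only [PySem.Int.toChars]
    constructor
    · intro h2; tauto
    · intro h2; tauto

-- A's per-section test as "some position holds '\n' and a header follows"
theorem pv_pred_iff (t sl : List Char) :
    (([ '\n' :: (sl ++ ['\n']), '\n' :: (sl ++ [':']), '\n' :: (sl ++ ['.']),
        '\n' :: ('1' :: '.' :: ' ' :: sl), '\n' :: ('2' :: '.' :: ' ' :: sl),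
        '\n' :: ('3' :: '.' :: ' ' :: sl), '\n' :: ('4' :: '.' :: ' ' :: sl),
        '\n' :: ('5' :: '.' :: ' ' :: sl) ].any (fun p => PySem.Chars.isIn p t)) = true) ↔
    ∃ i : Nat, t[i]? = some '\n' ∧ pvIsHeaderAt t (i + 1) sl = true := by
  simp only [List.any_cons, List.any_nil, Bool.or_eq_true, Bool.false_eq_true, or_false,
    pv_isIn_cons_newline, pv_isHeaderAt_iff]
  constructor
  · rintro (⟨i, h1, h2⟩ | ⟨i, h1, h2⟩ | ⟨i, h1, h2⟩ | ⟨i, h1, h2⟩ | ⟨i, h1, h2⟩ | ⟨i, h1, h2⟩ | ⟨i, h1, h2⟩ | ⟨i, h1, h2⟩) <;>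
      exact ⟨i, h1, by tauto⟩
  · rintro ⟨i, h1, h2 | h2 | h2 | h2 | h2 | h2 | h2 | h2⟩ <;>
      [exact Or.inl ⟨i, h1, h2⟩;
       exact Or.inr (Or.inl ⟨i, h1, h2⟩);
       exact Or.inr (Or.inr (Or.inl ⟨i, h1, h2⟩));
       exact Or.inr (Or.inr (Or.inr (Or.inl ⟨i, h1, h2⟩)));
       exact Or.inr (Or.inr (Or.inr (Or.inr (Or.inl ⟨i, h1, h2⟩))));
       exact Or.inr (Or.inr (Or.inr (Or.inr (Or.inr (Or.inl ⟨i, h1, h2⟩)))));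
       exact Or.inr (Or.inr (Or.inr (Or.inr (Or.inr (Or.inr (Or.inl ⟨i, h1, h2⟩))))));
       exact Or.inr (Or.inr (Or.inr (Or.inr (Or.inr (Or.inr (Or.inr ⟨i, h1, h2⟩))))))]

-- membership after B's inner loop over the enumerated sections
theorem pv_inner_mem (t : List Char) (pos : Nat) (l : List (Int × List Char)) (m : PySem.Set Int) (j : Int) :
    (j ∈ l.foldl (fun m q =>
        if !(PySem.Set.contains m q.1) && pvIsHeaderAt t pos q.2 then PySem.Set.add m q.1 else m) m) ↔
      j ∈ m ∨ ∃ q ∈ l, j = q.1 ∧ pvIsHeaderAt t pos q.2 = true := by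
  induction l generalizing m with
  | nil => simp
  | cons q l ih =>
    simp only [List.foldl_cons, ih, List.mem_cons]
    constructor
    · rintro (hm | hrest)
      · split_ifs at hm with h
        · rw [PySem.Set.mem_add] at hm
          rcases hm with hm | hm
          · exact Or.inl hm
          · simp only [Bool.and_eq_true, Bool.not_eq_true'] at h
            exact Or.inr ⟨q, Or.inl rfl, hm, h.2⟩
        · exact Or.inl hm
      · rcases hrest with ⟨q', hq', hj⟩
        exact Or.inr ⟨q', Or.inr hq', hj⟩
    · rintro (hm | ⟨q', hq' | hq', hj⟩)
      · left
        split_ifs with h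
        · rw [PySem.Set.mem_add]; exact Or.inl hm
        · exact hm
      · subst hq'
        left
        split_ifs with h
        · rw [PySem.Set.mem_add]; exact Or.inr hj.1
        · simp only [Bool.and_eq_true, Bool.not_eq_true'] at h
          rw [← PySem.Set.contains_iff]
          rw [hj.1]
          by_contra hc
          exact h ⟨by simpa using hc, hj.2⟩
      · exact Or.inr ⟨q', hq', hj⟩

-- membership after B's outer loop over the enumerated text
theorem pv_outer_mem (t : List Char) (lowers : List (List Char)) (l : List (Int × Char)) (m : PySem.Set Int) (j : Int) :
    (j ∈ l.foldl (fun m p =>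
        if p.2 = '\n' then
          (PySem.List.enumerate lowers).foldl (fun m q =>
            if !(PySem.Set.contains m q.1) && pvIsHeaderAt t (p.1.toNat + 1) q.2 then PySem.Set.add m q.1 else m) m
        else m) m) ↔
      j ∈ m ∨ ∃ p ∈ l, p.2 = '\n' ∧ ∃ q ∈ PySem.List.enumerate lowers, j = q.1 ∧ pvIsHeaderAt t (p.1.toNat + 1) q.2 = true := by
  induction l generalizing m with
  | nil => simp
  | cons p l ih =>
    simp only [List.foldl_cons, ih, List.mem_cons]
    constructor
    · rintro (hm | hrest)
      · split_ifs at hm with h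
        · rw [pv_inner_mem] at hm
          rcases hm with hm | ⟨q, hq, hj⟩
          · exact Or.inl hm
          · exact Or.inr ⟨p, Or.inl rfl, h, q, hq, hj⟩
        · exact Or.inl hm
      · rcases hrest with ⟨p', hp', hnl, hq⟩
        exact Or.inr ⟨p', Or.inr hp', hnl, hq⟩
    · rintro (hm | ⟨p', hp' | hp', hnl, hq⟩)
      · left
        split_ifs with h
        · rw [pv_inner_mem]; exact Or.inl hm
        · exact hm
      · subst hp'
        left
        rw [if_pos hnl, pv_inner_mem]
        exact Or.inr hq
      · exact Or.inr ⟨p', hp', hnl, hq⟩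

-- B's condition for section index k, read off the two enumerates
theorem pv_B_cond (t : List Char) (lowers : List (List Char)) (k : Nat) (hk : k < lowers.length) :
    (∃ p ∈ PySem.List.enumerate t, p.2 = '\n' ∧
      ∃ q ∈ PySem.List.enumerate lowers, ((0 : Int) + k) = q.1 ∧ pvIsHeaderAt t (p.1.toNat + 1) q.2 = true) ↔
    ∃ i : Nat, t[i]? = some '\n' ∧ pvIsHeaderAt t (i + 1) lowers[k] = true := by
  constructor
  · rintro ⟨p, hp, hnl, q, hq, heq, hh⟩
    rw [PySem.List.mem_enumerate_iff] at hp hq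
    obtain ⟨i, hi, rfl⟩ := hp
    obtain ⟨k', hk', rfl⟩ := hq
    have hkk : k = k' := by simpa using heq
    subst hkk
    refine ⟨i, ?_, ?_⟩
    · rw [List.getElem?_eq_getElem hi]
      simpa using hnl
    · simpa using hh
  · rintro ⟨i, hi, hh⟩
    rw [List.getElem?_eq_some_iff] at hi
    obtain ⟨hil, hiv⟩ := hi
    refine ⟨(0 + (i : Int), t[i]), ?_, by simpa using hiv, ((0 : Int) + k, lowers[k]), ?_, rfl, by simpa using hh⟩
    · rw [PySem.List.mem_enumerate_iff]; exact ⟨i, hil, rfl⟩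
    · rw [PySem.List.mem_enumerate_iff]; exact ⟨k, hk, rfl⟩

-- final pass: filtering enumerate by an index predicate that agrees with a value predicate
theorem pv_filter_enumerate (xs : List String) (Q : Int → Bool) (P : String → Bool) (s : Int)
    (h : ∀ (k : Nat) (hk : k < xs.length), Q (s + k) = P xs[k]) :
    ((PySem.List.enumerate xs s).filter (fun q => Q q.1)).map (fun q => q.2) = xs.filter P := by
  induction xs generalizing s with
  | nil => simp [PySem.List.enumerate_nil]
  | cons x xs ih =>
    rw [PySem.List.enumerate_cons, List.filter_cons, List.filter_cons]
    have h0 : Q s = P x := by simpa using h 0 (by simp)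
    have ih' := ih (s + 1) (fun k hk => by
      have := h (k + 1) (by simpa using Nat.succ_lt_succ hk)
      simpa [add_assoc, Int.add_comm 1 (k : Int)] using this)
    by_cases hp : P x = true
    · rw [if_pos (by simpa [h0] using hp), if_pos hp, List.map_cons, ih']
    · rw [if_neg (by simpa [h0] using hp), if_neg hp, ih']

-- ===== VERDICT (by name: the statement is the Claim_ definition above) =====
theorem identify_sections_heuristic_py_spec : Claim_equal_identify_sections_heuristic_py := by
  intro paper_text standard_sections _
  unfold Spec_identify_sections_heuristic_py identify_sections_heuristic_py identify_sections_heuristic_py_alt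
  simp only []
  rw [PySem.List.foldl_append_if_eq_filter,
      PySem.List.foldl_append_if (f := fun q : Int × String => q.2), List.nil_append, List.nil_append]
  refine (pv_filter_enumerate standard_sections _ _ 0 ?_).symm
  intro k hk
  rw [Bool.eq_iff_iff, PySem.Set.contains_iff, pv_outer_mem, pv_pred_iff]
  have hlen : k < (standard_sections.map (fun s => PySem.Chars.lower s.toList)).length := by
    simpa using hk
  rw [pv_B_cond _ _ k hlen]
  simp only [List.getElem_map, PySem.Set.empty]
  simp
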